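-- pv_equiv track=rewrite | github.com/dolgodolah/TIL | algorithm/Programmers/카카오 코딩테스트/2018 카카오 블라인드 채용_[1차] 프렌즈4블록.py | solution
-- ===== SOURCE A (Python) =====
-- dx=[0,0,1,1]
--
-- dy=[0,1,0,1]
--
-- def solution(m, n, board):
--     answer = 0
--     for i in range(len(board)):
--         board[i]=list(board[i])
--     visited = [[False]*n for _ in range(m)]
--     while True: #깨지는 블럭이 없을 때까지 진행한다.
--         val=False #while문을 종료시킬지 결정하는 변수
--
--         #2x2모양의 같은 4개 블럭(깨질 블럭)을 찾아 visited를 True로 바꿔준다.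
--         for x in range(m-1):
--             for y in range(n-1):
--                 for i in range(4):
--                     nx,ny=x+dx[i],y+dy[i]
--                     if board[x][y]==' ' or board[x][y]!=board[nx][ny]:
--                         break
--                 else: #2x2모양의 4개 블록 발견하면
--                     for i in range(4):
--                         nx,ny=x+dx[i],y+dy[i]
--                         if visited[nx][ny]==False:
--                             visited[nx][ny]=True
--                             val=True
--                             answer+=1
--
--         if val==False:break
--
--         #visited를 통해 깨질 블럭을 ' '로 바꿔준다.
--         for i in range(m):
--             for j in range(n):
--                 if visited[i][j]==True:
--                     visited[i][j]=False
--                     board[i][j]=' '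
--
--
--         #' ' 위에 남아있는 블럭이 있으면 내려온다.
--         for i in range(m-1,0,-1):
--             for j in range(n):
--                 if board[i][j]==' ':
--                     for k in range(1,i+1):
--                         if not board[i-k][j]==' ':
--                             board[i][j],board[i-k][j]=board[i-k][j],' '
--                             break
--
--
--
--
--
--     return answer
-- ===== SOURCE B (Python) =====
-- def solution(m, n, board):
--     for i in range(len(board)):
--         board[i] = list(board[i])
--     answer = 0
--     while True:
--         matched = {(x + a, y + b)
--                    for x in range(m - 1) for y in range(n - 1)
--                    if board[x][y] != ' '
--                    and board[x][y] == board[x][y + 1] == board[x + 1][y] == board[x + 1][y + 1]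
--                    for a in (0, 1) for b in (0, 1)}
--         if not matched:
--             break
--         answer += len(matched)
--         for i, row in enumerate(board):
--             board[i] = [' ' if (i, j) in matched else c for j, c in enumerate(row)]
--         newcols = []
--         for j in range(n):
--             col = [board[i][j] for i in range(m) if board[i][j] != ' ']
--             newcols.append([' '] * (m - len(col)) + col)
--         for i in range(m):
--             board[i] = [newcols[j][i] for j in range(n)]
--     return answer
-- ===== Notes on version B (the rewrite author's own statement) =====
-- stated objective: alternative
-- what changed: B replaces the visited-matrix marking with a set comprehension of matched cells (answer += len(set) per round) and replaces the per-cell upward scan-and-swap gravity with a one-pass per-column compaction (non-space cells of each column written to the bottom, spaces on top).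
-- outside the precondition, e.g. on solution(2, 2, [' b', 'x']): A returns 0, B returns 0
import Mathlib
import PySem

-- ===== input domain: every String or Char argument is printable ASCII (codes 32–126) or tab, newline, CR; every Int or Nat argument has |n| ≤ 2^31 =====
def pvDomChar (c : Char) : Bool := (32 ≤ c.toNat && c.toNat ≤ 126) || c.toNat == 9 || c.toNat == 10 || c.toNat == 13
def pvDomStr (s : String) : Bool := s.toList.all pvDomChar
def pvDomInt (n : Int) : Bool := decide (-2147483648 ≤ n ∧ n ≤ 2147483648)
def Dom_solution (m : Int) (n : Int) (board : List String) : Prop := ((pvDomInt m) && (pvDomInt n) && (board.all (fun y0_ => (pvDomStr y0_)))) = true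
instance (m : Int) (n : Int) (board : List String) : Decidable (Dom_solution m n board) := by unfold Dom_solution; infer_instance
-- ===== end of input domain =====

-- B replaces A's visited-matrix marking by a set of matched cells and A's per-cell upward
-- scan-and-swap gravity by a one-pass per-column compaction; the equivalence proved here is about
-- the return value (both Pythons also mutate `board` in place, identically on Pre_solution).

-- ===== PORT A =====
def dxA : List Int := [0, 0, 1, 1]
def dyA : List Int := [0, 1, 0, 1]

-- board[x][y] (exact for in-range indices; Pre_solution keeps every read in range)
def cellA (g : List (List Char)) (x y : Int) : Char :=
  PySem.List.pyGetD (PySem.List.pyGetD g x []) y ' '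

def vgetA (v : List (List Bool)) (x y : Int) : Bool :=
  PySem.List.pyGetD (PySem.List.pyGetD v x []) y false

-- xs[i] = a (exact for 0 ≤ i < len xs; Pre_solution keeps every write in range)
def setIA {α : Type} (xs : List α) (i : Int) (a : α) : List α := xs.set i.toNat a

-- board[i][j] = a / visited[i][j] = b
def setCellA (g : List (List Char)) (i j : Int) (a : Char) : List (List Char) :=
  setIA g i (setIA (PySem.List.pyGetD g i []) j a)
def setVisA (v : List (List Bool)) (i j : Int) (b : Bool) : List (List Bool) :=
  setIA v i (setIA (PySem.List.pyGetD v i []) j b)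

-- the `for i in range(4): … break` / `else` detection loop
def checkA (g : List (List Char)) (x y : Int) : List Int → Bool
  | [] => true
  | i :: rest =>
    if cellA g x y == ' ' || cellA g x y != cellA g (x + PySem.List.pyGetD dxA i 0) (y + PySem.List.pyGetD dyA i 0) then false
    else checkA g x y rest

-- body of `for i in range(4)` marking the four cells of a found block
def markA (x y : Int) (st : List (List Bool) × Bool × Int) (i : Int) :
    List (List Bool) × Bool × Int :=
  if vgetA st.1 (x + PySem.List.pyGetD dxA i 0) (y + PySem.List.pyGetD dyA i 0) = false then
    (setVisA st.1 (x + PySem.List.pyGetD dxA i 0) (y + PySem.List.pyGetD dyA i 0) true, true, st.2.2 + 1)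
  else st

def scanA (g : List (List Char)) (m n : Int) (st0 : List (List Bool) × Bool × Int) :
    List (List Bool) × Bool × Int :=
  (PySem.List.pyRange 0 (m - 1) 1).foldl (fun st x =>
    (PySem.List.pyRange 0 (n - 1) 1).foldl (fun st y =>
      if checkA g x y (PySem.List.pyRange 0 4 1) then
        (PySem.List.pyRange 0 4 1).foldl (markA x y) st
      else st) st) st0

def clearA (m n : Int) (st0 : List (List Bool) × List (List Char)) :
    List (List Bool) × List (List Char) :=
  (PySem.List.pyRange 0 m 1).foldl (fun st i =>
    (PySem.List.pyRange 0 n 1).foldl (fun st j =>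
      if vgetA st.1 i j = true then (setVisA st.1 i j false, setCellA st.2 i j ' ') else st) st) st0

-- the `for k in range(1, i+1): … break` falling loop
def dropA (i j : Int) (g : List (List Char)) : List Int → List (List Char)
  | [] => g
  | k :: rest =>
    if !(cellA g (i - k) j == ' ') then
      setCellA (setCellA g i j (cellA g (i - k) j)) (i - k) j ' '
    else dropA i j g rest

def gravA (m n : Int) (g0 : List (List Char)) : List (List Char) :=
  (PySem.List.pyRange (m - 1) 0 (-1)).foldl (fun g i =>
    (PySem.List.pyRange 0 n 1).foldl (fun g j =>
      if cellA g i j == ' ' then dropA i j g (PySem.List.pyRange 1 (i + 1) 1) else g) g) g0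

-- `while True:` (fuel only guards termination; each productive round clears ≥ 1 of the ≤ m*n cells)
def loopA (m n : Int) : Nat → List (List Char) → List (List Bool) → Int → Int
  | 0, _, _, answer => answer
  | fuel + 1, g, visited, answer =>
    let st := scanA g m n (visited, false, answer)
    if st.2.1 = false then st.2.2
    else
      let cl := clearA m n (st.1, g)
      loopA m n fuel (gravA m n cl.2) cl.1 st.2.2

def solution (m : Int) (n : Int) (board : List String) : Int :=
  loopA m n (m.toNat * n.toNat + 1) (board.map String.toList)
    (List.replicate m.toNat (List.replicate n.toNat false)) 0

-- ===== PORT B =====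
def cellB (g : List (List Char)) (x y : Int) : Char :=
  PySem.List.pyGetD (PySem.List.pyGetD g x []) y ' '

def matchB (g : List (List Char)) (x y : Int) : Bool :=
  cellB g x y != ' ' && cellB g x y == cellB g x (y + 1)
    && cellB g x (y + 1) == cellB g (x + 1) y && cellB g (x + 1) y == cellB g (x + 1) (y + 1)

def offsB : List (Int × Int) := [(0, 0), (0, 1), (1, 0), (1, 1)]

-- the set comprehension {(x+a, y+b) …}
def matchedB (g : List (List Char)) (m n : Int) : PySem.Set (Int × Int) :=
  (PySem.List.pyRange 0 (m - 1) 1).foldl (fun s x =>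
    (PySem.List.pyRange 0 (n - 1) 1).foldl (fun s y =>
      if matchB g x y then
        offsB.foldl (fun s ab => PySem.Set.add s (x + ab.1, y + ab.2)) s
      else s) s) PySem.Set.empty

def clearB (s : PySem.Set (Int × Int)) (m n : Int) (g : List (List Char)) : List (List Char) :=
  (PySem.List.pyRange 0 m 1).map (fun i =>
    (PySem.List.pyRange 0 n 1).map (fun j =>
      if PySem.Set.contains s (i, j) then ' ' else cellB g i j))

def colB (g : List (List Char)) (m j : Int) : List Char :=
  ((PySem.List.pyRange 0 m 1).filter (fun i => cellB g i j != ' ')).map (fun i => cellB g i j)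

def gravB (m n : Int) (g : List (List Char)) : List (List Char) :=
  let newcols := (PySem.List.pyRange 0 n 1).map (fun j =>
    PySem.List.pyRepeat [' '] (m - ((colB g m j).length : Int)) ++ colB g m j)
  (PySem.List.pyRange 0 m 1).map (fun i =>
    (PySem.List.pyRange 0 n 1).map (fun j =>
      PySem.List.pyGetD (PySem.List.pyGetD newcols j []) i ' '))

def loopB (m n : Int) : Nat → List (List Char) → Int → Int
  | 0, _, answer => answer
  | fuel + 1, g, answer =>
    let s := matchedB g m n
    if s.isEmpty then answer
    else loopB m n fuel (gravB m n (clearB s m n g)) (answer + (s.length : Int))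

def solution_alt (m : Int) (n : Int) (board : List String) : Int :=
  loopB m n (m.toNat * n.toNat + 1) (board.map String.toList) 0

-- ===== PRECONDITION & SPEC =====
-- Pre_solution excludes boards whose dimensions do not both match (m, n) when m ≥ 2 and n ≥ 2:
-- there A in general raises IndexError (it indexes the full m×n grid), and on the few such boards
-- on which an early `break` lets A return, B may index out of range as well.
def Pre_solution (m : Int) (n : Int) (board : List String) : Prop :=
  m ≤ 1 ∨ n ≤ 1 ∨ ((board.length : Int) = m ∧ ∀ s ∈ board, PySem.Str.len s = n)
instance (m : Int) (n : Int) (board : List String) : Decidable (Pre_solution m n board) := by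
  unfold Pre_solution; infer_instance

def pvWitness_solution : Int × Int × List String := (2, 2, ["ab", "cd"])

def Spec_solution (m : Int) (n : Int) (board : List String) (out : Int) : Prop := out = solution_alt m n board
instance (m : Int) (n : Int) (board : List String) (out : Int) : Decidable (Spec_solution m n board out) := by unfold Spec_solution; infer_instance

-- ===== CLAIM (what is proved, stated in full; the proofs are below) =====
def Claim_equal_solution : Prop := ∀ (m : Int) (n : Int) (board : List String), Dom_solution m n board → Pre_solution m n board → Spec_solution m n board (solution m n board)

-- ===== LEMMAS AND PROOFS =====

/-! ### Proof-side notions: rectangular boards, matrix get/set, columns -/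

def RectM {α : Type} (w : List (List α)) (M N : Nat) : Prop :=
  w.length = M ∧ ∀ r ∈ w, r.length = N

def mget {α : Type} (d : α) (w : List (List α)) (p q : Int) : α :=
  PySem.List.pyGetD (PySem.List.pyGetD w p []) q d

def msetP {α : Type} (w : List (List α)) (i j : Int) (a : α) : List (List α) :=
  setIA w i (setIA (PySem.List.pyGetD w i []) j a)

def mkF (M N : Nat) : List (List Bool) := List.replicate M (List.replicate N false)

def colOf (g : List (List Char)) (j : Nat) : List Char := g.map (fun r => r.getD j ' ')

def keepCol (c : List Char) : List Char := c.filter (fun ch => !(ch == ' '))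

def settle (M : Nat) (c : List Char) : List Char :=
  List.replicate (M - (keepCol c).length) ' ' ++ keepCol c

def colDrop (i : Nat) (c : List Char) : List Nat → List Char
  | [] => c
  | k :: rest =>
    if !(c.getD (i - k) ' ' == ' ') then (c.set i (c.getD (i - k) ' ')).set (i - k) ' '
    else colDrop i c rest

def colStep (c : List Char) (i : Nat) : List Char :=
  if c.getD i ' ' == ' ' then colDrop i c (List.range' 1 i) else c

def gravN : Nat → List Char → List Char
  | 0, c => c
  | t + 1, c => gravN t (colStep c (t + 1))

def descL : Nat → List Nat
  | 0 => []
  | t + 1 => (t + 1) :: descL t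

def InvP (M N : Nat) (a0 : Int) (S : PySem.Set (Int × Int))
    (st : List (List Bool) × Bool × Int) : Prop :=
  RectM st.1 M N ∧
  (∀ p q : Int, 0 ≤ p → p < (M : Int) → 0 ≤ q → q < (N : Int) →
    vgetA st.1 p q = decide ((p, q) ∈ S)) ∧
  st.2.1 = !S.isEmpty ∧ st.2.2 = a0 + (S.length : Int)

/-! ### Basic bridges -/

theorem cellB_eq_cellA : @cellB = @cellA := rfl
theorem vgetA_eq_mget (v : List (List Bool)) (p q : Int) : vgetA v p q = mget false v p q := rfl
theorem cellA_eq_mget (g : List (List Char)) (p q : Int) : cellA g p q = mget ' ' g p q := rfl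
theorem setVisA_eq_msetP (v : List (List Bool)) (i j : Int) (b : Bool) :
    setVisA v i j b = msetP v i j b := rfl
theorem setCellA_eq_msetP (g : List (List Char)) (i j : Int) (a : Char) :
    setCellA g i j a = msetP g i j a := rfl

theorem getD_idx {α : Type} (l : List α) (d : α) {n : Nat} (h : n < l.length) :
    l.getD n d = l[n] := by
  simp [List.getD_eq_getElem?_getD, List.getElem?_eq_getElem h]

theorem mget_natCast {α : Type} (d : α) (w : List (List α)) (p q : Nat) :
    mget d w (p : Int) (q : Int) = (w.getD p []).getD q d := by
  simp [mget, PySem.List.pyGetD_natCast]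

theorem mget_nn {α : Type} (d : α) (w : List (List α)) {p q : Int} (hp : 0 ≤ p) (hq : 0 ≤ q) :
    mget d w p q = (w.getD p.toNat []).getD q.toNat d := by
  conv_lhs => rw [show p = ((p.toNat : Nat) : Int) by omega, show q = ((q.toNat : Nat) : Int) by omega]
  rw [mget_natCast]

theorem rect_row {α : Type} {w : List (List α)} {M N : Nat} (h : RectM w M N)
    {p : Nat} (hp : p < M) : (w.getD p []).length = N := by
  have hp' : p < w.length := by rw [h.1]; exact hp
  rw [getD_idx _ _ hp']
  exact h.2 _ (List.getElem_mem hp')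

theorem matrix_ext {α : Type} (d : α) {w w' : List (List α)} {M N : Nat}
    (h1 : RectM w M N) (h2 : RectM w' M N)
    (h : ∀ p q : Nat, p < M → q < N →
      mget d w (p : Int) (q : Int) = mget d w' (p : Int) (q : Int)) :
    w = w' := by
  apply List.ext_getElem (by rw [h1.1, h2.1])
  intro p hp hp'
  have hpM : p < M := by rw [← h1.1]; exact hp
  apply List.ext_getElem
  · rw [h1.2 _ (List.getElem_mem hp), h2.2 _ (List.getElem_mem hp')]
  intro q hq hq'
  have hqN : q < N := by rw [← h1.2 _ (List.getElem_mem hp)]; exact hq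
  have e := h p q hpM hqN
  rw [mget_natCast, mget_natCast] at e
  rw [getD_idx w [] hp, getD_idx w' [] hp'] at e
  rw [getD_idx _ d hq, getD_idx _ d hq'] at e
  exact e

theorem rect_msetP {α : Type} {w : List (List α)} {M N : Nat} (h : RectM w M N)
    {i : Int} (j : Int) (hi : 0 ≤ i) (hiM : i < (M : Int)) (a : α) :
    RectM (msetP w i j a) M N := by
  constructor
  · simpa [msetP, setIA] using h.1
  · intro r hr
    simp only [msetP, setIA] at hr
    rcases List.mem_or_eq_of_mem_set hr with h' | h'
    · exact h.2 r h'
    · subst h'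
      rw [List.length_set]
      have hI : PySem.List.pyGetD w i [] = w.getD i.toNat [] := by
        conv_lhs => rw [show i = ((i.toNat : Nat) : Int) by omega]
        rw [PySem.List.pyGetD_natCast]
      rw [hI]
      exact rect_row h (by omega)

theorem mget_msetP {α : Type} (d : α) {w : List (List α)} {M N : Nat} (h : RectM w M N)
    {i j : Int} (hi : 0 ≤ i) (hiM : i < (M : Int)) (hj : 0 ≤ j) (hjN : j < (N : Int)) (a : α)
    {p q : Int} (hp : 0 ≤ p) (hpM : p < (M : Int)) (hq : 0 ≤ q) (hqN : q < (N : Int)) :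
    mget d (msetP w i j a) p q = if p = i ∧ q = j then a else mget d w p q := by
  have hpw : p.toNat < w.length := by rw [h.1]; omega
  have hrow : (w.getD i.toNat []).length = N := rect_row h (by omega)
  have hrowp : (w.getD p.toNat []).length = N := rect_row h (by omega)
  have hI : PySem.List.pyGetD w i [] = w.getD i.toNat [] := by
    conv_lhs => rw [show i = ((i.toNat : Nat) : Int) by omega]
    rw [PySem.List.pyGetD_natCast]
  rw [mget_nn d _ hp hq, mget_nn d _ hp hq]
  simp only [msetP, setIA, hI]
  rw [getD_idx (w.set i.toNat ((w.getD i.toNat []).set j.toNat a)) []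
    (by rw [List.length_set]; exact hpw)]
  rw [List.getElem_set]
  by_cases hpi : p = i
  · have hpi' : i.toNat = p.toNat := by omega
    rw [if_pos hpi']
    rw [getD_idx ((w.getD i.toNat []).set j.toNat a) d (by rw [List.length_set, hrow]; omega)]
    rw [List.getElem_set]
    by_cases hqj : q = j
    · rw [if_pos (by omega : j.toNat = q.toNat), if_pos ⟨hpi, hqj⟩]
    · rw [if_neg (by omega : ¬ j.toNat = q.toNat), if_neg (fun hc => hqj hc.2)]
      simp only [hpi']
      rw [getD_idx (w.getD p.toNat []) d (by rw [hrowp]; omega)]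
  · rw [if_neg (by omega : ¬ i.toNat = p.toNat)]
    rw [if_neg (fun hc => hpi hc.1)]
    rw [getD_idx w [] hpw]

theorem getD_replicate_self {α : Type} (n k : Nat) (a : α) :
    (List.replicate n a).getD k a = a := by
  rw [List.getD_eq_getElem?_getD]
  rcases h : (List.replicate n a)[k]? with _ | x
  · rfl
  · have hx : x ∈ List.replicate n a := List.mem_of_getElem? h
    rw [List.eq_of_mem_replicate hx]
    rfl

theorem mget_mkF (M N : Nat) {p q : Int} (hp : 0 ≤ p) (hpM : p < (M : Int)) (hq : 0 ≤ q)
    (hqN : q < (N : Int)) : mget false (mkF M N) p q = false := by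
  rw [mget_nn false _ hp hq]
  have hlen : (mkF M N).length = M := by simp [mkF]
  rw [getD_idx (mkF M N) [] (by rw [hlen]; omega)]
  simp only [mkF, List.getElem_replicate]
  exact getD_replicate_self N q.toNat false

theorem rect_mkF (M N : Nat) : RectM (mkF M N) M N := by
  constructor
  · simp [mkF]
  · intro r hr
    simp only [mkF] at hr
    rw [List.eq_of_mem_replicate hr]
    simp

theorem contains_eq_decide_mem (S : List (Int × Int)) (e : Int × Int) :
    S.contains e = decide (e ∈ S) := by
  by_cases h : e ∈ S <;> simp [h]

theorem set_contains_eq (S : PySem.Set (Int × Int)) (e : Int × Int) :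
    PySem.Set.contains S e = decide (e ∈ S) := contains_eq_decide_mem S e

theorem mget_map_range {α : Type} (d : α) {M N : Nat} (F : Nat → Nat → α)
    {p q : Nat} (hp : p < M) (hq : q < N) :
    mget d ((List.range M).map (fun (i : Nat) => (List.range N).map (fun (j : Nat) => F i j)))
      (p : Int) (q : Int) = F p q := by
  rw [mget_natCast]
  rw [getD_idx ((List.range M).map (fun (i : Nat) =>
    (List.range N).map (fun (j : Nat) => F i j))) [] (by simpa using hp)]
  rw [List.getElem_map, List.getElem_range]
  rw [getD_idx ((List.range N).map (fun (j : Nat) => F p j)) d (by simpa using hq)]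
  rw [List.getElem_map, List.getElem_range]

theorem map_pyRange0 {α : Type} (M : Nat) (f : Int → α) :
    (PySem.List.pyRange 0 (M : Int) 1).map f = (List.range M).map (fun (p : Nat) => f (p : Int)) := by
  rw [PySem.List.pyRange_zero_natCast, List.map_map]
  rfl

theorem len_pyRange0 (M : Nat) : (PySem.List.pyRange 0 (M : Int) 1).length = M := by
  rw [PySem.List.pyRange_zero_natCast]
  simp

/-! ### Detection: A's break/else loop equals B's chained comparison -/

theorem check_eq (g : List (List Char)) (x y : Int) :
    checkA g x y (PySem.List.pyRange 0 4 1) = matchB g x y := by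
  have h4 : PySem.List.pyRange 0 4 1 = [0, 1, 2, 3] := by decide
  rw [h4]
  have e0 : PySem.List.pyGetD dxA 0 0 = 0 := by decide
  have e1 : PySem.List.pyGetD dxA 1 0 = 0 := by decide
  have e2 : PySem.List.pyGetD dxA 2 0 = 1 := by decide
  have e3 : PySem.List.pyGetD dxA 3 0 = 1 := by decide
  have f0 : PySem.List.pyGetD dyA 0 0 = 0 := by decide
  have f1 : PySem.List.pyGetD dyA 1 0 = 1 := by decide
  have f2 : PySem.List.pyGetD dyA 2 0 = 0 := by decide
  have f3 : PySem.List.pyGetD dyA 3 0 = 1 := by decide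
  simp only [checkA, e0, e1, e2, e3, f0, f1, f2, f3, add_zero, bne_self_eq_false,
    Bool.or_false, matchB, cellB_eq_cellA]
  by_cases h0 : cellA g x y = ' '
  · simp [h0]
  · by_cases h1 : cellA g x y = cellA g x (y + 1)
    · by_cases h2 : cellA g x (y + 1) = cellA g (x + 1) y
      · by_cases h3 : cellA g (x + 1) y = cellA g (x + 1) (y + 1)
        · simp_all
        · simp_all
      · simp_all
    · simp_all

/-! ### Marking: A's visited/val/answer fold tracks B's set fold -/

theorem set_add_mem {S : PySem.Set (Int × Int)} {e : Int × Int} (h : e ∈ S) :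
    PySem.Set.add S e = S := by
  simp [PySem.Set.add, PySem.Set.contains, h]

theorem set_add_not_mem {S : PySem.Set (Int × Int)} {e : Int × Int} (h : ¬ e ∈ S) :
    PySem.Set.add S e = S ++ [e] := by
  simp [PySem.Set.add, PySem.Set.contains, h]

theorem inv_mark {M N : Nat} {a0 : Int} {S : PySem.Set (Int × Int)}
    {st : List (List Bool) × Bool × Int} (x y i u w : Int)
    (hu : x + PySem.List.pyGetD dxA i 0 = u) (hw : y + PySem.List.pyGetD dyA i 0 = w)
    (hub : 0 ≤ u ∧ u < (M : Int)) (hwb : 0 ≤ w ∧ w < (N : Int))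
    (h : InvP M N a0 S st) :
    InvP M N a0 (PySem.Set.add S (u, w)) (markA x y st i) := by
  obtain ⟨hrect, hrel, hval, hans⟩ := h
  unfold markA
  rw [hu, hw]
  by_cases hmem : (u, w) ∈ S
  · have hc : vgetA st.1 u w = true := by
      rw [hrel u w hub.1 hub.2 hwb.1 hwb.2]; simp [hmem]
    rw [hc, if_neg (by simp), set_add_mem hmem]
    exact ⟨hrect, hrel, hval, hans⟩
  · have hc : vgetA st.1 u w = false := by
      rw [hrel u w hub.1 hub.2 hwb.1 hwb.2]; simp [hmem]
    rw [hc, if_pos rfl, set_add_not_mem hmem]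
    refine ⟨?_, ?_, ?_, ?_⟩
    · rw [setVisA_eq_msetP]
      exact rect_msetP hrect w hub.1 hub.2 true
    · intro p q hp hpM hq hqN
      rw [setVisA_eq_msetP, vgetA_eq_mget,
        mget_msetP false hrect hub.1 hub.2 hwb.1 hwb.2 true hp hpM hq hqN]
      by_cases hpq : p = u ∧ q = w
      · rw [if_pos hpq]
        simp [hpq]
      · rw [if_neg hpq]
        rw [← vgetA_eq_mget, hrel p q hp hpM hq hqN]
        have hiff : ((p, q) ∈ S ++ [(u, w)]) ↔ (p, q) ∈ S := by
          simp only [List.mem_append, List.mem_singleton, Prod.mk.injEq]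
          constructor
          · rintro (h' | ⟨h1, h2⟩)
            · exact h'
            · exact absurd ⟨h1, h2⟩ hpq
          · exact Or.inl
        simp [hiff]
    · simp
    · show st.2.2 + 1 = a0 + (((S ++ [(u, w)]).length : Nat) : Int)
      rw [hans, List.length_append, List.length_singleton]
      push_cast
      ring

theorem inv_block {M N : Nat} {a0 : Int} {S : PySem.Set (Int × Int)}
    {st : List (List Bool) × Bool × Int} (x y : Int)
    (hx : 0 ≤ x) (hxM : x + 1 < (M : Int)) (hy : 0 ≤ y) (hyN : y + 1 < (N : Int))
    (h : InvP M N a0 S st) :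
    InvP M N a0 (offsB.foldl (fun s ab => PySem.Set.add s (x + ab.1, y + ab.2)) S)
      ((PySem.List.pyRange 0 4 1).foldl (markA x y) st) := by
  have h4 : PySem.List.pyRange 0 4 1 = [0, 1, 2, 3] := by decide
  rw [h4]
  simp only [offsB, List.foldl_cons, List.foldl_nil]
  apply inv_mark x y 3 (x + 1) (y + 1)
    (by norm_num [show PySem.List.pyGetD dxA 3 0 = 1 from by decide])
    (by norm_num [show PySem.List.pyGetD dyA 3 0 = 1 from by decide])
    ⟨by omega, by omega⟩ ⟨by omega, by omega⟩
  apply inv_mark x y 2 (x + 1) (y + 0)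
    (by norm_num [show PySem.List.pyGetD dxA 2 0 = 1 from by decide])
    (by norm_num [show PySem.List.pyGetD dyA 2 0 = 0 from by decide])
    ⟨by omega, by omega⟩ ⟨by omega, by omega⟩
  apply inv_mark x y 1 (x + 0) (y + 1)
    (by norm_num [show PySem.List.pyGetD dxA 1 0 = 0 from by decide])
    (by norm_num [show PySem.List.pyGetD dyA 1 0 = 1 from by decide])
    ⟨by omega, by omega⟩ ⟨by omega, by omega⟩
  apply inv_mark x y 0 (x + 0) (y + 0)
    (by norm_num [show PySem.List.pyGetD dxA 0 0 = 0 from by decide])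
    (by norm_num [show PySem.List.pyGetD dyA 0 0 = 0 from by decide])
    ⟨by omega, by omega⟩ ⟨by omega, by omega⟩
  exact h

theorem inv_row {M N : Nat} {a0 : Int} (g : List (List Char)) (x : Int)
    (hx : 0 ≤ x) (hxM : x + 1 < (M : Int)) :
    ∀ (ys : List Int) (S : PySem.Set (Int × Int)) (st : List (List Bool) × Bool × Int),
      (∀ y ∈ ys, 0 ≤ y ∧ y + 1 < (N : Int)) → InvP M N a0 S st →
      InvP M N a0
        (ys.foldl (fun s y =>
          if matchB g x y then
            offsB.foldl (fun s ab => PySem.Set.add s (x + ab.1, y + ab.2)) s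
          else s) S)
        (ys.foldl (fun st y =>
          if checkA g x y (PySem.List.pyRange 0 4 1) then
            (PySem.List.pyRange 0 4 1).foldl (markA x y) st
          else st) st) := by
  intro ys
  induction ys with
  | nil => intro S st _ h; simpa using h
  | cons y0 rest ih =>
    intro S st hb h
    simp only [List.foldl_cons]
    rw [check_eq]
    by_cases hm : matchB g x y0
    · rw [if_pos hm, if_pos hm]
      exact ih _ _ (fun y hy => hb y (List.mem_cons_of_mem _ hy))
        (inv_block x y0 hx hxM (hb y0 List.mem_cons_self).1 (hb y0 List.mem_cons_self).2 h)
    · rw [if_neg hm, if_neg hm]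
      exact ih _ _ (fun y hy => hb y (List.mem_cons_of_mem _ hy)) h

theorem inv_scan {M N : Nat} {a0 : Int} (g : List (List Char)) :
    ∀ (xs : List Int) (S : PySem.Set (Int × Int)) (st : List (List Bool) × Bool × Int),
      (∀ x ∈ xs, 0 ≤ x ∧ x + 1 < (M : Int)) → InvP M N a0 S st →
      InvP M N a0
        (xs.foldl (fun s x =>
          (PySem.List.pyRange 0 ((N : Int) - 1) 1).foldl (fun s y =>
            if matchB g x y then
              offsB.foldl (fun s ab => PySem.Set.add s (x + ab.1, y + ab.2)) s
            else s) s) S)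
        (xs.foldl (fun st x =>
          (PySem.List.pyRange 0 ((N : Int) - 1) 1).foldl (fun st y =>
            if checkA g x y (PySem.List.pyRange 0 4 1) then
              (PySem.List.pyRange 0 4 1).foldl (markA x y) st
            else st) st) st) := by
  intro xs
  induction xs with
  | nil => intro S st _ h; simpa using h
  | cons x0 rest ih =>
    intro S st hb h
    simp only [List.foldl_cons]
    apply ih _ _ (fun x hx => hb x (List.mem_cons_of_mem _ hx))
    apply inv_row g x0 (hb x0 List.mem_cons_self).1 (hb x0 List.mem_cons_self).2
    · intro y hy
      rw [PySem.List.mem_pyRange_one] at hy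
      omega
    · exact h

theorem scan_spec {M N : Nat} (g : List (List Char)) (a0 : Int) :
    InvP M N a0 (matchedB g (M : Int) (N : Int))
      (scanA g (M : Int) (N : Int) (mkF M N, false, a0)) := by
  apply inv_scan g (PySem.List.pyRange 0 ((M : Int) - 1) 1) PySem.Set.empty
    (mkF M N, false, a0)
  · intro x hx
    rw [PySem.List.mem_pyRange_one] at hx
    omega
  · refine ⟨rect_mkF M N, ?_, ?_, ?_⟩
    · intro p q hp hpM hq hqN
      rw [vgetA_eq_mget]
      rw [mget_mkF M N hp hpM hq hqN]
      simp [PySem.Set.empty]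
    · simp [PySem.Set.empty]
    · simp [PySem.Set.empty]

/-! ### Clearing -/

theorem clear_row {M N : Nat} (i : Int) :
    ∀ (ys : List Int) (st : List (List Bool) × List (List Char)),
      (∀ y ∈ ys, 0 ≤ y ∧ y < (N : Int)) → 0 ≤ i → i < (M : Int) →
      RectM st.1 M N → RectM st.2 M N →
      RectM ((ys.foldl (fun st j =>
          if vgetA st.1 i j = true then (setVisA st.1 i j false, setCellA st.2 i j ' ')
          else st) st)).1 M N ∧
      RectM ((ys.foldl (fun st j =>
          if vgetA st.1 i j = true then (setVisA st.1 i j false, setCellA st.2 i j ' ')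
          else st) st)).2 M N ∧
      (∀ p q : Int, 0 ≤ p → p < (M : Int) → 0 ≤ q → q < (N : Int) →
        vgetA ((ys.foldl (fun st j =>
          if vgetA st.1 i j = true then (setVisA st.1 i j false, setCellA st.2 i j ' ')
          else st) st)).1 p q = if p = i ∧ q ∈ ys then false else vgetA st.1 p q) ∧
      (∀ p q : Int, 0 ≤ p → p < (M : Int) → 0 ≤ q → q < (N : Int) →
        mget ' ' ((ys.foldl (fun st j =>
          if vgetA st.1 i j = true then (setVisA st.1 i j false, setCellA st.2 i j ' ')
          else st) st)).2 p q =
          if p = i ∧ q ∈ ys ∧ vgetA st.1 p q = true then ' ' else mget ' ' st.2 p q) := by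
  intro ys
  induction ys with
  | nil =>
    intro st _ _ _ h1 h2
    refine ⟨h1, h2, ?_, ?_⟩ <;> intro p q hp hpM hq hqN <;> simp
  | cons y0 rest ih =>
    intro st hb hi hiM h1 h2
    have hy0 : 0 ≤ y0 ∧ y0 < (N : Int) := hb y0 List.mem_cons_self
    simp only [List.foldl_cons]
    set st1 := if vgetA st.1 i y0 = true then (setVisA st.1 i y0 false, setCellA st.2 i y0 ' ')
      else st with hst1
    have r1 : RectM st1.1 M N := by
      rw [hst1]; split
      · exact rect_msetP h1 y0 hi hiM false
      · exact h1
    have r2 : RectM st1.2 M N := by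
      rw [hst1]; split
      · exact rect_msetP h2 y0 hi hiM ' '
      · exact h2
    have hv1 : ∀ p q : Int, 0 ≤ p → p < (M : Int) → 0 ≤ q → q < (N : Int) →
        vgetA st1.1 p q = if p = i ∧ q = y0 then false else vgetA st.1 p q := by
      intro p q hp hpM hq hqN
      rw [hst1]
      by_cases hv0 : vgetA st.1 i y0 = true
      · rw [if_pos hv0]
        rw [setVisA_eq_msetP, vgetA_eq_mget,
          mget_msetP false h1 hi hiM hy0.1 hy0.2 false hp hpM hq hqN]
        rfl
      · rw [if_neg hv0]
        by_cases hpq : p = i ∧ q = y0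
        · rw [if_pos hpq, hpq.1, hpq.2]
          simpa using hv0
        · rw [if_neg hpq]
    have hg1 : ∀ p q : Int, 0 ≤ p → p < (M : Int) → 0 ≤ q → q < (N : Int) →
        mget ' ' st1.2 p q =
          if p = i ∧ q = y0 ∧ vgetA st.1 p q = true then ' ' else mget ' ' st.2 p q := by
      intro p q hp hpM hq hqN
      rw [hst1]
      by_cases hv0 : vgetA st.1 i y0 = true
      · rw [if_pos hv0]
        rw [setCellA_eq_msetP,
          mget_msetP ' ' h2 hi hiM hy0.1 hy0.2 ' ' hp hpM hq hqN]
        by_cases hpq : p = i ∧ q = y0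
        · rw [if_pos hpq, if_pos ⟨hpq.1, hpq.2, by rw [hpq.1, hpq.2]; exact hv0⟩]
        · rw [if_neg hpq, if_neg (by tauto)]
      · rw [if_neg hv0]
        by_cases hpq : p = i ∧ q = y0 ∧ vgetA st.1 p q = true
        · exfalso
          apply hv0
          rw [← hpq.1, ← hpq.2.1]
          exact hpq.2.2
        · rw [if_neg hpq]
    obtain ⟨f1, f2, fv, fg⟩ := ih st1 (fun y hy => hb y (List.mem_cons_of_mem _ hy)) hi hiM r1 r2
    refine ⟨f1, f2, ?_, ?_⟩
    · intro p q hp hpM hq hqN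
      rw [fv p q hp hpM hq hqN, hv1 p q hp hpM hq hqN]
      by_cases hpi : p = i <;> by_cases hq0 : q = y0 <;> by_cases hqr : q ∈ rest <;>
        simp [hpi, hq0, hqr]
    · intro p q hp hpM hq hqN
      rw [fg p q hp hpM hq hqN, hv1 p q hp hpM hq hqN, hg1 p q hp hpM hq hqN]
      by_cases hpi : p = i <;> by_cases hq0 : q = y0 <;> by_cases hqr : q ∈ rest <;>
        by_cases hv0 : vgetA st.1 p q = true <;>
          simp [hpi, hq0, hqr, hv0]

theorem clear_outer {M N : Nat} :
    ∀ (xs : List Int) (st : List (List Bool) × List (List Char)),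
      (∀ x ∈ xs, 0 ≤ x ∧ x < (M : Int)) →
      RectM st.1 M N → RectM st.2 M N →
      RectM ((xs.foldl (fun st i =>
          (PySem.List.pyRange 0 (N : Int) 1).foldl (fun st j =>
            if vgetA st.1 i j = true then (setVisA st.1 i j false, setCellA st.2 i j ' ')
            else st) st) st)).1 M N ∧
      RectM ((xs.foldl (fun st i =>
          (PySem.List.pyRange 0 (N : Int) 1).foldl (fun st j =>
            if vgetA st.1 i j = true then (setVisA st.1 i j false, setCellA st.2 i j ' ')
            else st) st) st)).2 M N ∧
      (∀ p q : Int, 0 ≤ p → p < (M : Int) → 0 ≤ q → q < (N : Int) →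
        vgetA ((xs.foldl (fun st i =>
          (PySem.List.pyRange 0 (N : Int) 1).foldl (fun st j =>
            if vgetA st.1 i j = true then (setVisA st.1 i j false, setCellA st.2 i j ' ')
            else st) st) st)).1 p q = if p ∈ xs then false else vgetA st.1 p q) ∧
      (∀ p q : Int, 0 ≤ p → p < (M : Int) → 0 ≤ q → q < (N : Int) →
        mget ' ' ((xs.foldl (fun st i =>
          (PySem.List.pyRange 0 (N : Int) 1).foldl (fun st j =>
            if vgetA st.1 i j = true then (setVisA st.1 i j false, setCellA st.2 i j ' ')
            else st) st) st)).2 p q =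
          if p ∈ xs ∧ vgetA st.1 p q = true then ' ' else mget ' ' st.2 p q) := by
  intro xs
  induction xs with
  | nil =>
    intro st _ h1 h2
    refine ⟨h1, h2, ?_, ?_⟩ <;> intro p q hp hpM hq hqN <;> simp
  | cons x0 rest ih =>
    intro st hb h1 h2
    have hx0 : 0 ≤ x0 ∧ x0 < (M : Int) := hb x0 List.mem_cons_self
    simp only [List.foldl_cons]
    obtain ⟨r1, r2, rv, rg⟩ := clear_row x0 (PySem.List.pyRange 0 (N : Int) 1) st
      (fun y hy => by rw [PySem.List.mem_pyRange_one] at hy; omega) hx0.1 hx0.2 h1 h2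
    obtain ⟨f1, f2, fv, fg⟩ := ih _ (fun x hx => hb x (List.mem_cons_of_mem _ hx)) r1 r2
    refine ⟨f1, f2, ?_, ?_⟩
    · intro p q hp hpM hq hqN
      rw [fv p q hp hpM hq hqN, rv p q hp hpM hq hqN]
      have hqmem : q ∈ PySem.List.pyRange 0 (N : Int) 1 := by
        rw [PySem.List.mem_pyRange_one]; omega
      by_cases hpi : p = x0 <;> by_cases hpr : p ∈ rest <;> simp [hpi, hpr, hqmem]
    · intro p q hp hpM hq hqN
      rw [fg p q hp hpM hq hqN, rv p q hp hpM hq hqN, rg p q hp hpM hq hqN]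
      have hqmem : q ∈ PySem.List.pyRange 0 (N : Int) 1 := by
        rw [PySem.List.mem_pyRange_one]; omega
      by_cases hpi : p = x0 <;> by_cases hpr : p ∈ rest <;>
        by_cases hv0 : vgetA st.1 p q = true <;> simp [hpi, hpr, hqmem, hv0]

theorem rect_clearB {M N : Nat} (S : PySem.Set (Int × Int)) (g : List (List Char)) :
    RectM (clearB S (M : Int) (N : Int) g) M N := by
  constructor
  · simp [clearB, len_pyRange0]
  · intro r hr
    simp only [clearB, List.mem_map] at hr
    obtain ⟨i, _, hi⟩ := hr
    rw [← hi]
    simp [len_pyRange0]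

theorem clearB_entry {M N : Nat} (S : PySem.Set (Int × Int)) (g : List (List Char))
    {p q : Nat} (hp : p < M) (hq : q < N) :
    mget ' ' (clearB S (M : Int) (N : Int) g) (p : Int) (q : Int) =
      if (((p : Int)), ((q : Int))) ∈ S then ' ' else cellB g (p : Int) (q : Int) := by
  have hform : clearB S (M : Int) (N : Int) g = (List.range M).map (fun (i : Nat) =>
      (List.range N).map (fun (j : Nat) =>
        if PySem.Set.contains S ((i : Int), (j : Int)) then ' '
        else cellB g (i : Int) (j : Int))) := by
    unfold clearB
    rw [map_pyRange0]
    apply List.map_congr_left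
    intro i _
    rw [map_pyRange0]
  rw [hform]
  rw [mget_map_range ' ' (F := fun (i : Nat) (j : Nat) =>
    if PySem.Set.contains S ((i : Int), (j : Int)) then ' '
    else cellB g (i : Int) (j : Int)) hp hq]
  rw [set_contains_eq]
  by_cases h : (((p : Int)), ((q : Int))) ∈ S <;> simp [h]

theorem clear_spec {M N : Nat} (S : PySem.Set (Int × Int)) {v : List (List Bool)}
    {g : List (List Char)} (hv : RectM v M N) (hg : RectM g M N)
    (hrel : ∀ p q : Int, 0 ≤ p → p < (M : Int) → 0 ≤ q → q < (N : Int) →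
      vgetA v p q = decide ((p, q) ∈ S)) :
    clearA (M : Int) (N : Int) (v, g) = (mkF M N, clearB S (M : Int) (N : Int) g) := by
  obtain ⟨f1, f2, fv, fg⟩ := clear_outer (M := M) (N := N) (PySem.List.pyRange 0 (M : Int) 1)
    (v, g) (fun x hx => by rw [PySem.List.mem_pyRange_one] at hx; omega) hv hg
  apply Prod.ext
  · apply matrix_ext false f1 (rect_mkF M N)
    intro p q hp hq
    rw [← vgetA_eq_mget, fv (p : Int) (q : Int) (by omega) (by exact_mod_cast hp) (by omega)
      (by exact_mod_cast hq)]
    rw [if_pos (by rw [PySem.List.mem_pyRange_one]; constructor <;> [omega; exact_mod_cast hp])]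
    rw [mget_mkF M N (by omega) (by exact_mod_cast hp) (by omega) (by exact_mod_cast hq)]
  · apply matrix_ext ' ' f2 (rect_clearB S g)
    intro p q hp hq
    rw [fg (p : Int) (q : Int) (by omega) (by exact_mod_cast hp) (by omega) (by exact_mod_cast hq)]
    rw [clearB_entry S g hp hq]
    rw [hrel (p : Int) (q : Int) (by omega) (by exact_mod_cast hp) (by omega) (by exact_mod_cast hq)]
    have hmemrange : ((p : Int)) ∈ PySem.List.pyRange 0 (M : Int) 1 := by
      rw [PySem.List.mem_pyRange_one]
      constructor <;> [omega; exact_mod_cast hp]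
    by_cases h : (((p : Int)), ((q : Int))) ∈ S
    · rw [if_pos h, if_pos ⟨hmemrange, by simp [h]⟩]
    · rw [if_neg h, if_neg (by simp [h])]
      rfl

/-! ### Gravity: the per-column view of A's fold -/

theorem col_get {M N : Nat} {g : List (List Char)} (hg : RectM g M N) {p : Nat} (hp : p < M)
    (j : Nat) : (colOf g j).getD p ' ' = mget ' ' g (p : Int) (j : Int) := by
  rw [mget_natCast]
  have hp' : p < g.length := by rw [hg.1]; exact hp
  rw [getD_idx _ _ (by simpa [colOf] using hp')]
  simp only [colOf, List.getElem_map]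
  rw [getD_idx g [] hp']

theorem colOf_length (g : List (List Char)) (j : Nat) : (colOf g j).length = g.length := by
  simp [colOf]

theorem colOf_msetP {M N : Nat} {g : List (List Char)} (hg : RectM g M N) {i j : Int}
    (hi : 0 ≤ i) (hiM : i < (M : Int)) (hj : 0 ≤ j) (hjN : j < (N : Int)) (a : Char)
    (j' : Nat) (hj' : j' < N) :
    colOf (msetP g i j a) j' =
      if j' = j.toNat then (colOf g j').set i.toNat a else colOf g j' := by
  have hr' : RectM (msetP g i j a) M N := rect_msetP hg j hi hiM a
  by_cases hjj : j' = j.toNat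
  · rw [if_pos hjj]
    apply List.ext_getElem (by rw [colOf_length, hr'.1, List.length_set, colOf_length, hg.1])
    intro p hp hp'
    have hpM : p < M := by rw [colOf_length, hr'.1] at hp; exact hp
    have e1 : (colOf (msetP g i j a) j')[p] = mget ' ' (msetP g i j a) (p : Int) (j' : Int) := by
      rw [← col_get hr' hpM j', getD_idx _ _ hp]
    rw [e1, mget_msetP ' ' hg hi hiM hj hjN a (by omega) (by exact_mod_cast hpM) (by omega)
      (by exact_mod_cast hj')]
    rw [List.getElem_set]
    by_cases hpi : i.toNat = p
    · rw [if_pos hpi, if_pos ⟨by omega, by omega⟩]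
    · rw [if_neg hpi, if_neg (by intro hc; exact hpi (by omega))]
      rw [← col_get hg hpM j', getD_idx _ _ (by rw [colOf_length, hg.1]; exact hpM)]
  · rw [if_neg hjj]
    apply List.ext_getElem (by rw [colOf_length, hr'.1, colOf_length, hg.1])
    intro p hp hp'
    have hpM : p < M := by rw [colOf_length, hr'.1] at hp; exact hp
    have e1 : (colOf (msetP g i j a) j')[p] = mget ' ' (msetP g i j a) (p : Int) (j' : Int) := by
      rw [← col_get hr' hpM j', getD_idx _ _ hp]
    rw [e1, mget_msetP ' ' hg hi hiM hj hjN a (by omega) (by exact_mod_cast hpM) (by omega)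
      (by exact_mod_cast hj')]
    rw [if_neg (by intro hc; exact hjj (by omega))]
    rw [← col_get hg hpM j', getD_idx _ _ hp']

theorem dropA_col {M N : Nat} {g : List (List Char)} (hg : RectM g M N) (i j : Int)
    (hi0 : 0 ≤ i) (hiM : i < (M : Int)) (hj : 0 ≤ j) (hjN : j < (N : Int)) :
    ∀ (ks : List Nat), (∀ k ∈ ks, 1 ≤ k ∧ (k : Int) ≤ i) →
      RectM (dropA i j g (ks.map (fun (k : Nat) => (k : Int)))) M N ∧
      ∀ j' : Nat, j' < N →
        colOf (dropA i j g (ks.map (fun (k : Nat) => (k : Int)))) j' =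
          if j' = j.toNat then colDrop i.toNat (colOf g j') ks else colOf g j' := by
  intro ks
  induction ks with
  | nil =>
    intro _
    refine ⟨hg, fun j' hj' => ?_⟩
    simp [dropA, colDrop]
  | cons k rest ih =>
    intro hb
    have hk := hb k List.mem_cons_self
    have hikb0 : 0 ≤ i - (k : Int) := by omega
    have hikbM : i - (k : Int) < (M : Int) := by omega
    have hikn : (i - (k : Int)).toNat = i.toNat - k := by omega
    have hcell : ∀ j' : Nat, j' = j.toNat →
        cellA g (i - (k : Int)) j = (colOf g j').getD (i.toNat - k) ' ' := by
      intro j' hjj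
      rw [cellA_eq_mget, mget_nn ' ' g hikb0 hj]
      rw [col_get hg (p := i.toNat - k) (by omega) j', mget_natCast, hikn, hjj]
    simp only [List.map_cons, dropA]
    by_cases hhit : (!(cellA g (i - (k : Int)) j == ' ')) = true
    · rw [if_pos hhit]
      have hra : RectM (setCellA g i j (cellA g (i - (k : Int)) j)) M N := by
        rw [setCellA_eq_msetP]
        exact rect_msetP hg j hi0 hiM _
      have hrb : RectM (setCellA (setCellA g i j (cellA g (i - (k : Int)) j)) (i - (k : Int)) j ' ') M N := by
        rw [setCellA_eq_msetP, setCellA_eq_msetP]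
        exact rect_msetP (by rw [← setCellA_eq_msetP]; exact hra) j hikb0 hikbM ' '
      refine ⟨hrb, fun j' hj' => ?_⟩
      rw [setCellA_eq_msetP, setCellA_eq_msetP]
      rw [colOf_msetP (by rw [← setCellA_eq_msetP]; exact hra) hikb0 hikbM hj hjN ' ' j' hj']
      rw [colOf_msetP hg hi0 hiM hj hjN _ j' hj']
      by_cases hjj : j' = j.toNat
      · rw [if_pos hjj, if_pos hjj, if_pos hjj]
        rw [colDrop]
        rw [if_pos (by rw [← hcell j' hjj]; exact hhit)]
        rw [hikn, hcell j' hjj]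
      · rw [if_neg hjj, if_neg hjj, if_neg hjj]
    · rw [if_neg hhit]
      obtain ⟨ra, ca⟩ := ih (fun k' hk' => hb k' (List.mem_cons_of_mem _ hk'))
      refine ⟨ra, fun j' hj' => ?_⟩
      rw [ca j' hj']
      by_cases hjj : j' = j.toNat
      · rw [if_pos hjj, if_pos hjj]
        rw [colDrop]
        rw [if_neg (by rw [← hcell j' hjj]; exact hhit)]
      · rw [if_neg hjj, if_neg hjj]

theorem pyRange_one_natCast : ∀ (t : Nat),
    PySem.List.pyRange 1 ((t : Int) + 1) 1 = (List.range' 1 t).map (fun (k : Nat) => (k : Int)) := by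
  intro t
  induction t with
  | zero => decide
  | succ t ih =>
    have hc : ((t + 1 : Nat) : Int) + 1 = ((t : Int) + 1) + 1 := by push_cast; ring
    rw [hc, PySem.List.pyRange_one_succ_right (by omega), ih]
    have hrc : List.range' 1 (t + 1) 1 = List.range' 1 t 1 ++ [1 + 1 * t] := List.range'_concat
    rw [hrc]
    simp only [List.map_append, List.map_cons, List.map_nil]
    congr 2
    push_cast
    ring

theorem stepA_col {M N : Nat} {g : List (List Char)} (hg : RectM g M N) (t : Nat)
    (ht1 : 1 ≤ t) (htM : t < M) (j : Int) (hj : 0 ≤ j) (hjN : j < (N : Int)) :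
    RectM (if cellA g (t : Int) j == ' ' then
      dropA (t : Int) j g (PySem.List.pyRange 1 ((t : Int) + 1) 1) else g) M N ∧
    ∀ j' : Nat, j' < N →
      colOf (if cellA g (t : Int) j == ' ' then
        dropA (t : Int) j g (PySem.List.pyRange 1 ((t : Int) + 1) 1) else g) j' =
        if j' = j.toNat then colStep (colOf g j') t else colOf g j' := by
  have hgtop : ∀ j' : Nat, j' = j.toNat → cellA g (t : Int) j = (colOf g j').getD t ' ' := by
    intro j' hjj
    rw [cellA_eq_mget, mget_nn ' ' g (by omega) hj, col_get hg (p := t) htM j', mget_natCast, hjj]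
    try rw [Int.toNat_natCast]
  by_cases hsp : (cellA g (t : Int) j == ' ') = true
  · rw [if_pos hsp, pyRange_one_natCast]
    obtain ⟨hr, hcol⟩ := dropA_col hg (t : Int) j (by omega) (by exact_mod_cast htM) hj hjN
      (List.range' 1 t) (fun k hk => by rw [List.mem_range'_1] at hk; constructor <;> omega)
    refine ⟨hr, fun j' hj' => ?_⟩
    rw [hcol j' hj']
    by_cases hjj : j' = j.toNat
    · rw [if_pos hjj, if_pos hjj, colStep]
      rw [if_pos (by rw [← hgtop j' hjj]; exact hsp)]
      simp
    · rw [if_neg hjj, if_neg hjj]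
  · rw [if_neg hsp]
    refine ⟨hg, fun j' hj' => ?_⟩
    by_cases hjj : j' = j.toNat
    · rw [if_pos hjj, colStep, if_neg (by rw [← hgtop j' hjj]; exact hsp)]
    · rw [if_neg hjj]

theorem grav_row {M N : Nat} (t : Nat) (ht1 : 1 ≤ t) (htM : t < M) :
    ∀ (ys : List Int) (g : List (List Char)), RectM g M N →
      (∀ y ∈ ys, 0 ≤ y ∧ y < (N : Int)) → ys.Nodup →
      RectM (ys.foldl (fun g j =>
        if cellA g (t : Int) j == ' ' then
          dropA (t : Int) j g (PySem.List.pyRange 1 ((t : Int) + 1) 1) else g) g) M N ∧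
      ∀ j' : Nat, j' < N →
        colOf (ys.foldl (fun g j =>
          if cellA g (t : Int) j == ' ' then
            dropA (t : Int) j g (PySem.List.pyRange 1 ((t : Int) + 1) 1) else g) g) j' =
          if (j' : Int) ∈ ys then colStep (colOf g j') t else colOf g j' := by
  intro ys
  induction ys with
  | nil =>
    intro g hg _ _
    refine ⟨hg, fun j' hj' => ?_⟩
    simp
  | cons y0 rest ih =>
    intro g hg hb hnd
    have hy0 : 0 ≤ y0 ∧ y0 < (N : Int) := hb y0 List.mem_cons_self
    simp only [List.foldl_cons]
    obtain ⟨r1, c1⟩ := stepA_col hg t ht1 htM y0 hy0.1 hy0.2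
    obtain ⟨r2, c2⟩ := ih _ r1 (fun y hy => hb y (List.mem_cons_of_mem _ hy))
      (List.Nodup.of_cons hnd)
    have hy0r : y0 ∉ rest := (List.nodup_cons.mp hnd).1
    refine ⟨r2, fun j' hj' => ?_⟩
    rw [c2 j' hj', c1 j' hj']
    by_cases hmem : (j' : Int) ∈ rest
    · have hne : ¬ j' = y0.toNat := by
        intro hc
        apply hy0r
        rw [show y0 = ((j' : Nat) : Int) from by omega]
        exact hmem
      rw [if_pos hmem, if_neg hne, if_pos (by simp [hmem])]
    · rw [if_neg hmem]
      by_cases hje : j' = y0.toNat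
      · rw [if_pos hje, if_pos (by simp only [List.mem_cons]; left; omega)]
      · rw [if_neg hje, if_neg (by
          simp only [List.mem_cons]
          rintro (hc | hc)
          · exact hje (by omega)
          · exact hmem hc)]

theorem grav_outer {M N : Nat} :
    ∀ (ts : List Nat) (g : List (List Char)), RectM g M N →
      (∀ t ∈ ts, 1 ≤ t ∧ t < M) →
      RectM ((ts.map (fun (k : Nat) => (k : Int))).foldl (fun g i =>
        (PySem.List.pyRange 0 (N : Int) 1).foldl (fun g j =>
          if cellA g i j == ' ' then dropA i j g (PySem.List.pyRange 1 (i + 1) 1) else g) g) g)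
        M N ∧
      ∀ j' : Nat, j' < N →
        colOf ((ts.map (fun (k : Nat) => (k : Int))).foldl (fun g i =>
          (PySem.List.pyRange 0 (N : Int) 1).foldl (fun g j =>
            if cellA g i j == ' ' then dropA i j g (PySem.List.pyRange 1 (i + 1) 1) else g) g) g) j' =
          ts.foldl (fun c t => colStep c t) (colOf g j') := by
  intro ts
  induction ts with
  | nil =>
    intro g hg _
    exact ⟨hg, fun j' hj' => rfl⟩
  | cons t rest ih =>
    intro g hg hb
    have ht := hb t List.mem_cons_self
    simp only [List.map_cons, List.foldl_cons]
    have hnd : (PySem.List.pyRange 0 (N : Int) 1).Nodup := by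
      rw [PySem.List.pyRange_zero_natCast]
      exact (List.nodup_range).map (fun a b h => by omega)
    obtain ⟨r1, c1⟩ := grav_row t ht.1 ht.2 (PySem.List.pyRange 0 (N : Int) 1) g hg
      (fun y hy => by rw [PySem.List.mem_pyRange_one] at hy; omega) hnd
    obtain ⟨r2, c2⟩ := ih _ r1 (fun x hx => hb x (List.mem_cons_of_mem _ hx))
    refine ⟨r2, fun j' hj' => ?_⟩
    rw [c2 j' hj', c1 j' hj', if_pos (by rw [PySem.List.mem_pyRange_one]; omega)]

/-! ### Gravity: the pure column lemma -/

theorem getD_append_left {α : Type} (u v : List α) (d : α) {n : Nat} (h : n < u.length) :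
    (u ++ v).getD n d = u.getD n d := by
  rw [getD_idx _ _ (by simp; omega), getD_idx _ _ h, List.getElem_append_left h]

theorem set_append_left {α : Type} (u v : List α) (a : α) {n : Nat} (h : n < u.length) :
    (u ++ v).set n a = u.set n a ++ v := by
  rw [List.set_append, if_pos h]

theorem set_concat_length {α : Type} (u : List α) (a b : α) :
    (u ++ [a]).set u.length b = u ++ [b] := by
  rw [List.set_append, if_neg (by omega)]
  simp

theorem colDrop_length (i : Nat) (c : List Char) :
    ∀ ks, (colDrop i c ks).length = c.length := by
  intro ks
  induction ks with
  | nil => rfl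
  | cons k rest ih =>
    simp only [colDrop]
    split
    · simp
    · exact ih

theorem colStep_length (c : List Char) (i : Nat) : (colStep c i).length = c.length := by
  unfold colStep
  split
  · exact colDrop_length i c _
  · rfl

theorem colDrop_append (i : Nat) (u : List Char) (a : Char) (hi : i < u.length) :
    ∀ ks, (∀ k ∈ ks, k ≤ i) → colDrop i (u ++ [a]) ks = colDrop i u ks ++ [a] := by
  intro ks
  induction ks with
  | nil => intro _; rfl
  | cons k rest ih =>
    intro hks
    have hk : k ≤ i := hks k List.mem_cons_self
    have hik : i - k < u.length := by omega
    simp only [colDrop]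
    rw [getD_append_left u [a] ' ' hik]
    split
    · rw [set_append_left u [a] (u.getD (i - k) ' ') hi,
        set_append_left (u.set i (u.getD (i - k) ' ')) [a] ' ' (by rw [List.length_set]; omega)]
    · exact ih (fun k' h' => hks k' (List.mem_cons_of_mem _ h'))

theorem colStep_append (u : List Char) (a : Char) {i : Nat} (hi : i < u.length) :
    colStep (u ++ [a]) i = colStep u i ++ [a] := by
  unfold colStep
  rw [getD_append_left u [a] ' ' hi]
  split
  · exact colDrop_append i u a hi _ (fun k hk => by rw [List.mem_range'_1] at hk; omega)
  · rfl

theorem gravN_append (a : Char) : ∀ (s : Nat) (u : List Char), s < u.length →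
    gravN s (u ++ [a]) = gravN s u ++ [a] := by
  intro s
  induction s with
  | zero => intro u _; rfl
  | succ s ih =>
    intro u hs
    show gravN s (colStep (u ++ [a]) (s + 1)) = gravN s (colStep u (s + 1)) ++ [a]
    rw [colStep_append u a hs]
    exact ih _ (by rw [colStep_length]; omega)

theorem colDrop_none (i : Nat) (c : List Char) :
    ∀ ks, (∀ k ∈ ks, c.getD (i - k) ' ' = ' ') → colDrop i c ks = c := by
  intro ks
  induction ks with
  | nil => intro _; rfl
  | cons k rest ih =>
    intro h
    simp only [colDrop]
    rw [if_neg (by rw [h k List.mem_cons_self]; simp)]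
    exact ih fun k' hk' => h k' (List.mem_cons_of_mem _ hk')

theorem colDrop_found (i : Nat) (c : List Char) (k : Nat) (ks2 : List Nat)
    (hk : c.getD (i - k) ' ' ≠ ' ') :
    ∀ ks1, (∀ k' ∈ ks1, c.getD (i - k') ' ' = ' ') →
      colDrop i c (ks1 ++ k :: ks2) = (c.set i (c.getD (i - k) ' ')).set (i - k) ' ' := by
  intro ks1
  induction ks1 with
  | nil =>
    intro _
    simp only [List.nil_append, colDrop]
    rw [if_pos (by simpa using hk)]
  | cons k' rest ih =>
    intro h
    simp only [List.cons_append, colDrop]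
    rw [if_neg (by rw [h k' List.mem_cons_self]; simp)]
    exact ih fun x hx => h x (List.mem_cons_of_mem _ hx)

theorem keepCol_append (u v : List Char) : keepCol (u ++ v) = keepCol u ++ keepCol v :=
  List.filter_append _ _

theorem all_blank_of_keep_nil (u : List Char) (h : keepCol u = []) :
    ∀ q, q < u.length → u.getD q ' ' = ' ' := by
  intro q hq
  rw [getD_idx _ _ hq]
  have := List.filter_eq_nil_iff.mp h u[q] (List.getElem_mem hq)
  simpa using this

theorem exists_nonblank (u : List Char) (h : keepCol u ≠ []) :
    ∃ q, q < u.length ∧ u.getD q ' ' ≠ ' ' := by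
  obtain ⟨a, ha⟩ := List.exists_mem_of_ne_nil _ h
  have hmem := List.mem_filter.mp ha
  obtain ⟨q, hq, hqe⟩ := List.mem_iff_getElem.mp hmem.1
  refine ⟨q, hq, ?_⟩
  rw [getD_idx _ _ hq, hqe]
  simpa using hmem.2

theorem set_decomp {α : Type} : ∀ (u : List α) (p : Nat), p < u.length → ∀ (a : α),
    u.set p a = u.take p ++ a :: u.drop (p + 1) := by
  intro u
  induction u with
  | nil => intro p hp; simp at hp
  | cons x t ih =>
    intro p hp a
    cases p with
    | zero => simp
    | succ p =>
      simp only [List.set_cons_succ, List.take_succ_cons, List.drop_succ_cons, List.cons_append]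
      rw [ih p (by simpa using hp) a]

theorem self_decomp {α : Type} (u : List α) (p : Nat) (hp : p < u.length) :
    u = u.take p ++ u[p] :: u.drop (p + 1) := by
  conv_lhs => rw [← List.take_append_drop p u]
  congr 1
  exact List.drop_eq_getElem_cons hp

theorem keep_last (u : List Char) (p : Nat) (hp : p < u.length)
    (hPp : u.getD p ' ' ≠ ' ')
    (hafter : ∀ r, p < r → r < u.length → u.getD r ' ' = ' ') :
    keepCol u = keepCol (u.set p ' ') ++ [u.getD p ' '] := by
  have hdropblank : List.filter (fun ch => !(ch == ' ')) (u.drop (p + 1)) = [] := by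
    apply List.filter_eq_nil_iff.mpr
    intro a ha
    obtain ⟨o, ho, hoe⟩ := List.mem_iff_getElem.mp ha
    have hlen : p + 1 + o < u.length := by
      have hdl : (u.drop (p + 1)).length = u.length - (p + 1) := List.length_drop
      omega
    have hav : a = u[p + 1 + o] := by
      rw [← hoe, List.getElem_drop]
    have hblank := hafter (p + 1 + o) (by omega) hlen
    rw [getD_idx _ _ hlen] at hblank
    simp [hav, hblank]
  have hgd : u.getD p ' ' = u[p] := getD_idx _ _ hp
  conv_lhs => rw [self_decomp u p hp]
  rw [set_decomp u p hp ' ']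
  simp only [keepCol, List.filter_append, List.filter_cons]
  rw [show (!(u[p] == ' ')) = true from by rw [← hgd]; simpa using hPp]
  rw [show (!((' ' : Char) == ' ')) = false from by simp]
  rw [hdropblank, hgd]
  simp

theorem gravN_settle : ∀ (L : Nat) (c : List Char), c.length = L →
    gravN (L - 1) c = settle L c := by
  intro L
  induction L with
  | zero =>
    intro c hc
    rw [List.length_eq_zero_iff.mp hc]
    simp [gravN, settle, keepCol]
  | succ t ih =>
    intro c hc
    have hcne : c ≠ [] := by intro h; rw [h] at hc; simp at hc
    obtain ⟨u, a, rfl⟩ : ∃ u a, c = u ++ [a] :=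
      ⟨c.dropLast, c.getLast hcne, (List.dropLast_append_getLast hcne).symm⟩
    have hu : u.length = t := by
      simp only [List.length_append, List.length_cons, List.length_nil] at hc
      omega
    rw [Nat.succ_sub_one]
    cases t with
    | zero =>
      rw [List.length_eq_zero_iff.mp hu]
      by_cases ha : a = ' '
      · subst ha
        simp [gravN, settle, keepCol]
      · simp [gravN, settle, keepCol, ha]
    | succ s =>
      have hsl : s + 1 = u.length := by omega
      have hgetTop : (u ++ [a]).getD (s + 1) ' ' = a := by
        rw [getD_idx _ _ (by simp [List.length_append]; omega)]
        rw [List.getElem_append_right (by omega)]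
        simp [show s + 1 - u.length = 0 from by omega]
      show gravN s (colStep (u ++ [a]) (s + 1)) = settle (s + 1 + 1) (u ++ [a])
      by_cases ha : a = ' '
      case neg =>
        rw [colStep, hgetTop, if_neg (by simpa using ha)]
        rw [gravN_append a s u (by omega)]
        have ihu : gravN s u = settle (s + 1) u := ih u (by omega)
        rw [ihu]
        rw [settle, settle, keepCol_append]
        rw [show keepCol [a] = [a] from by simp [keepCol, ha]]
        have hlen2 : (s + 1 + 1) - (keepCol u ++ [a]).length = (s + 1) - (keepCol u).length := by
          simp only [List.length_append, List.length_cons, List.length_nil]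
          omega
        rw [hlen2, List.append_assoc]
      case pos =>
        subst ha
        rw [colStep, hgetTop, if_pos (by simp)]
        by_cases hkeep : keepCol u = []
        · have hall : ∀ k ∈ List.range' 1 (s + 1), (u ++ [' ']).getD (s + 1 - k) ' ' = ' ' := by
            intro k hk
            rw [List.mem_range'_1] at hk
            have hik : s + 1 - k < u.length := by omega
            rw [getD_append_left u [' '] ' ' hik]
            exact all_blank_of_keep_nil u hkeep _ hik
          rw [colDrop_none _ _ _ hall]
          rw [gravN_append ' ' s u (by omega)]
          have ihu : gravN s u = settle (s + 1) u := ih u (by omega)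
          rw [ihu]
          rw [settle, settle, keepCol_append, hkeep]
          rw [show keepCol [' '] = [] from by simp [keepCol]]
          simp only [List.append_nil, List.length_nil, Nat.sub_zero]
          rw [← List.replicate_succ' (n := s + 1)]
        · obtain ⟨q0, hq0, hq0P⟩ := exists_nonblank u hkeep
          set p := Nat.findGreatest (fun r => u.getD r ' ' ≠ ' ') s with hpdef
          have hPp : u.getD p ' ' ≠ ' ' :=
            Nat.findGreatest_spec (P := fun r => u.getD r ' ' ≠ ' ') (m := q0) (n := s)
              (by omega) hq0P
          have hgr : ∀ r, p < r → r < u.length → u.getD r ' ' = ' ' := by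
            intro r h1 h2
            by_contra hcon
            exact Nat.findGreatest_is_greatest h1 (by omega) hcon
          have hple : p ≤ s := Nat.findGreatest_le s
          have hpu : p < u.length := by omega
          set k := s + 1 - p with hkdef
          have hk1 : 1 ≤ k := by omega
          have hdec : List.range' 1 (s + 1) =
              List.range' 1 (k - 1) ++ k :: List.range' (k + 1) (s + 1 - k) := by
            have h1 : List.range' 1 (k - 1) 1 ++ List.range' (1 + 1 * (k - 1)) ((s + 1 - k) + 1) 1 =
                List.range' 1 ((k - 1) + ((s + 1 - k) + 1)) 1 := List.range'_append
            rw [show 1 + 1 * (k - 1) = k from by omega] at h1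
            rw [List.range'_succ] at h1
            rw [show (k - 1) + ((s + 1 - k) + 1) = s + 1 from by omega] at h1
            exact h1.symm
          rw [hdec]
          rw [colDrop_found (s + 1) (u ++ [' ']) k _
            (by
              rw [show s + 1 - k = p from by omega]
              rw [getD_append_left u [' '] ' ' hpu]
              exact hPp)
            _
            (by
              intro k' hk'
              rw [List.mem_range'_1] at hk'
              have hik : s + 1 - k' < u.length := by omega
              rw [getD_append_left u [' '] ' ' hik]
              exact hgr _ (by omega) hik)]
          rw [show s + 1 - k = p from by omega]
          rw [getD_append_left u [' '] ' ' hpu]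
          have hsetTop : (u ++ [' ']).set (s + 1) (u.getD p ' ') = u ++ [u.getD p ' '] := by
            conv_lhs => rw [hsl]
            exact set_concat_length u ' ' _
          rw [hsetTop]
          rw [set_append_left u [u.getD p ' '] ' ' hpu]
          rw [gravN_append _ s _ (by rw [List.length_set]; omega)]
          have ihu : gravN s (u.set p ' ') = settle (s + 1) (u.set p ' ') :=
            ih (u.set p ' ') (by rw [List.length_set]; omega)
          rw [ihu]
          have hkeq := keep_last u p hpu hPp hgr
          rw [settle, settle]
          rw [show keepCol (u ++ [' ']) = keepCol u from by
            rw [keepCol_append, show keepCol [' '] = [] from by simp [keepCol]]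
            simp]
          rw [hkeq]
          have hlen3 : (s + 1 + 1) - (keepCol (u.set p ' ') ++ [u.getD p ' ']).length =
              (s + 1) - (keepCol (u.set p ' ')).length := by
            simp only [List.length_append, List.length_cons, List.length_nil]
            omega
          rw [hlen3, List.append_assoc]

/-! ### Gravity: assembling both sides -/

theorem foldl_descL : ∀ (T : Nat) (c : List Char),
    (descL T).foldl (fun c t => colStep c t) c = gravN T c := by
  intro T
  induction T with
  | zero => intro c; rfl
  | succ T ih =>
    intro c
    simp only [descL, List.foldl_cons]
    exact ih _

theorem mem_descL : ∀ (T k : Nat), k ∈ descL T → 1 ≤ k ∧ k ≤ T := by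
  intro T
  induction T with
  | zero => intro k hk; simp [descL] at hk
  | succ T ih =>
    intro k hk
    simp only [descL, List.mem_cons] at hk
    rcases hk with h | h
    · omega
    · have := ih k h
      omega

theorem desc_map_aux : ∀ (T : Nat),
    (List.range T).map (fun (k : Nat) => (T : Int) - (k : Int)) = (descL T).map (fun (k : Nat) => (k : Int)) := by
  intro T
  induction T with
  | zero => rfl
  | succ T ih =>
    rw [List.range_succ_eq_map, descL]
    simp only [List.map_cons, List.map_map]
    refine congrArg₂ List.cons ?_ ?_
    · push_cast
      ring
    · rw [← ih]
      apply List.map_congr_left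
      intro x _
      simp only [Function.comp_apply]
      push_cast
      ring

theorem pyRange_desc_eq (T : Nat) :
    PySem.List.pyRange (T : Int) 0 (-1) = (List.range T).map (fun (k : Nat) => (T : Int) - (k : Int)) := by
  unfold PySem.List.pyRange
  rw [if_neg (by norm_num)]
  cases T with
  | zero => simp
  | succ T0 =>
    rw [if_neg (by norm_num), if_pos (by exact_mod_cast Nat.succ_pos T0)]
    have hc : ((((T0 + 1 : Nat) : Int)) - 0 + - -1 - 1) / - -1 = ((T0 + 1 : Nat) : Int) := by
      norm_num
    rw [hc]
    rw [Int.toNat_natCast]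
    show List.map (fun (k : Nat) => (((T0 + 1 : Nat)) : Int) + -1 * (k : Int)) (List.range (T0 + 1)) =
      List.map (fun (k : Nat) => (((T0 + 1 : Nat)) : Int) - (k : Int)) (List.range (T0 + 1))
    apply List.map_congr_left
    intro x _
    ring

theorem pyRange_desc (T : Nat) :
    PySem.List.pyRange (T : Int) 0 (-1) = (descL T).map (fun (k : Nat) => (k : Int)) := by
  rw [pyRange_desc_eq, desc_map_aux]

theorem colOf_eq_map_range {M N : Nat} {g : List (List Char)} (hg : RectM g M N) (q : Nat) :
    colOf g q = (List.range M).map (fun (p : Nat) => mget ' ' g (p : Int) (q : Int)) := by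
  apply List.ext_getElem (by simp [colOf_length, hg.1])
  intro p hp hp'
  have hpg : p < g.length := by
    rw [colOf_length] at hp
    exact hp
  simp only [colOf, List.getElem_map, List.getElem_range]
  rw [mget_natCast, getD_idx g [] hpg]

theorem colB_eq {M N : Nat} {g : List (List Char)} (hg : RectM g M N) (q : Nat) (hq : q < N) :
    colB g (M : Int) (q : Int) = keepCol (colOf g q) := by
  unfold colB keepCol
  rw [PySem.List.pyRange_zero_natCast, colOf_eq_map_range hg q]
  generalize List.range M = L
  induction L with
  | nil => rfl
  | cons p L ih =>
    simp only [List.map_cons, List.filter_cons]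
    have hcb : cellB g (p : Int) (q : Int) = mget ' ' g (p : Int) (q : Int) := rfl
    by_cases hv : mget ' ' g (p : Int) (q : Int) = ' '
    · rw [if_neg (by simp [hcb, hv]), if_neg (by simp [hv])]
      exact ih
    · rw [if_pos (by simp [hcb, hv]), if_pos (by simp [hv])]
      rw [List.map_cons, ih, hcb]

theorem rect_gravB {M N : Nat} (g : List (List Char)) :
    RectM (gravB (M : Int) (N : Int) g) M N := by
  constructor
  · simp [gravB, len_pyRange0]
  · intro r hr
    simp only [gravB, List.mem_map] at hr
    obtain ⟨i, _, hi⟩ := hr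
    rw [← hi]
    simp [len_pyRange0]

theorem gravB_entry {M N : Nat} {g : List (List Char)} (hg : RectM g M N)
    {p q : Nat} (hp : p < M) (hq : q < N) :
    mget ' ' (gravB (M : Int) (N : Int) g) (p : Int) (q : Int) =
      (settle M (colOf g q)).getD p ' ' := by
  simp only [gravB, map_pyRange0]
  rw [mget_map_range ' ' (F := fun (p0 : Nat) (q0 : Nat) =>
    PySem.List.pyGetD (PySem.List.pyGetD ((List.range N).map (fun (j : Nat) =>
      PySem.List.pyRepeat [' '] ((M : Int) - ((colB g (M : Int) (j : Int)).length : Int)) ++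
        colB g (M : Int) (j : Int))) (q0 : Int) []) (p0 : Int) ' ') hp hq]
  rw [PySem.List.pyGetD_natCast]
  rw [PySem.List.pyGetD_natCast]
  rw [getD_idx ((List.range N).map (fun (j : Nat) =>
    PySem.List.pyRepeat [' '] ((M : Int) - ((colB g (M : Int) (j : Int)).length : Int)) ++
      colB g (M : Int) (j : Int))) [] (by simpa using hq)]
  rw [List.getElem_map, List.getElem_range]
  rw [colB_eq hg q hq, PySem.List.pyRepeat_singleton]
  have hkle : (keepCol (colOf g q)).length ≤ M := by
    have h1 := List.length_filter_le (fun ch => !(ch == ' ')) (colOf g q)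
    rw [colOf_length, hg.1] at h1
    exact h1
  rw [show ((M : Int) - ((keepCol (colOf g q)).length : Int)).toNat =
    M - (keepCol (colOf g q)).length from by omega]
  rfl

theorem grav_eq {M N : Nat} {g : List (List Char)} (hg : RectM g M N) :
    gravA (M : Int) (N : Int) g = gravB (M : Int) (N : Int) g := by
  cases M with
  | zero =>
    have hg0 : g = [] := List.length_eq_zero_iff.mp hg.1
    subst hg0
    have h1 : PySem.List.pyRange (((0 : Nat) : Int) - 1) 0 (-1) = [] := by
      norm_num
    have h2 : PySem.List.pyRange 0 ((0 : Nat) : Int) 1 = [] := by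
      norm_num
    unfold gravA gravB
    rw [h1, h2]
    simp
  | succ M0 =>
    obtain ⟨hrA, hcolA⟩ := grav_outer (M := M0 + 1) (N := N) (descL M0) g hg
      (fun t ht => by have := mem_descL _ t ht; omega)
    have hAeq : gravA (((M0 + 1 : Nat)) : Int) (N : Int) g =
        ((descL M0).map (fun (k : Nat) => (k : Int))).foldl (fun g i =>
          (PySem.List.pyRange 0 (N : Int) 1).foldl (fun g j =>
            if cellA g i j == ' ' then dropA i j g (PySem.List.pyRange 1 (i + 1) 1) else g) g) g := by
      unfold gravA
      rw [show (((M0 + 1 : Nat)) : Int) - 1 = ((M0 : Nat) : Int) from by push_cast; ring,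
        pyRange_desc M0]
    rw [hAeq]
    apply matrix_ext ' ' hrA (rect_gravB g)
    intro p q hp hq
    rw [gravB_entry hg hp hq]
    rw [← col_get hrA hp q]
    rw [hcolA q hq, foldl_descL]
    have hclen : (colOf g q).length = M0 + 1 := by rw [colOf_length, hg.1]
    have hset : gravN M0 (colOf g q) = settle (M0 + 1) (colOf g q) :=
      gravN_settle (M0 + 1) (colOf g q) hclen
    rw [hset]

/-! ### The lockstep while-loop -/

theorem loop_eq {M N : Nat} (fuel : Nat) : ∀ (g : List (List Char)) (a : Int),
    RectM g M N →
    loopA (M : Int) (N : Int) fuel g (mkF M N) a = loopB (M : Int) (N : Int) fuel g a := by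
  induction fuel with
  | zero => intro g a _; rfl
  | succ fuel ih =>
    intro g a hg
    obtain ⟨hrect, hrel, hval, hans⟩ := scan_spec (M := M) (N := N) g a
    simp only [loopA, loopB]
    rw [hval, hans]
    by_cases hS : (matchedB g (M : Int) (N : Int)).isEmpty = true
    · rw [if_pos (by rw [hS]; rfl), if_pos hS]
      rw [List.isEmpty_iff.mp hS]
      simp
    · have hS' : (matchedB g (M : Int) (N : Int)).isEmpty = false := by
        cases h : (matchedB g (M : Int) (N : Int)).isEmpty
        · rfl
        · exact absurd h hS
      rw [if_neg (by rw [hS']; simp), if_neg hS]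
      rw [clear_spec (matchedB g (M : Int) (N : Int)) hrect hg hrel]
      show loopA (M : Int) (N : Int) fuel
          (gravA (M : Int) (N : Int) (clearB (matchedB g (M : Int) (N : Int)) (M : Int) (N : Int) g))
          (mkF M N) (a + ((matchedB g (M : Int) (N : Int)).length : Int)) =
        loopB (M : Int) (N : Int) fuel
          (gravB (M : Int) (N : Int) (clearB (matchedB g (M : Int) (N : Int)) (M : Int) (N : Int) g))
          (a + ((matchedB g (M : Int) (N : Int)).length : Int))
      rw [grav_eq (rect_clearB _ g)]
      exact ih _ _ (rect_gravB _)

/-! ### Degenerate boards: nothing is ever matched when m ≤ 1 or n ≤ 1 -/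

theorem pyRange_nil {a b : Int} (h : b ≤ a) : PySem.List.pyRange a b 1 = [] := by
  apply List.eq_nil_iff_forall_not_mem.mpr
  intro x hx
  rw [PySem.List.mem_pyRange_one] at hx
  omega

theorem scan_degenerate (m n : Int) (hmn : m ≤ 1 ∨ n ≤ 1) (g : List (List Char))
    (v : List (List Bool)) (a : Int) :
    scanA g m n (v, false, a) = (v, false, a) ∧ matchedB g m n = PySem.Set.empty := by
  rcases hmn with h | h
  · have hmr : PySem.List.pyRange 0 (m - 1) 1 = [] := pyRange_nil (by omega)
    constructor
    · simp [scanA, hmr]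
    · simp [matchedB, hmr]
  · have hin : PySem.List.pyRange 0 (n - 1) 1 = [] := pyRange_nil (by omega)
    constructor
    · simp only [scanA, hin, List.foldl_nil]
      exact PySem.List.foldl_ignore _ _
    · simp only [matchedB, hin, List.foldl_nil]
      exact PySem.List.foldl_ignore _ _

theorem degenerate_eq (m n : Int) (hmn : m ≤ 1 ∨ n ≤ 1) (board : List String) :
    solution m n board = 0 ∧ solution_alt m n board = 0 := by
  obtain ⟨h1, h2⟩ := scan_degenerate m n hmn (board.map String.toList)
    (List.replicate m.toNat (List.replicate n.toNat false)) 0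
  constructor
  · show loopA m n (m.toNat * n.toNat + 1) _ _ 0 = 0
    simp only [loopA, h1]
    rfl
  · show loopB m n (m.toNat * n.toNat + 1) _ 0 = 0
    simp only [loopB, h2]
    rfl

-- ===== VERDICT (by name: the statement is the Claim_ definition above) =====
theorem solution_spec : Claim_equal_solution := by
  intro m n board _ hpre
  unfold Spec_solution
  by_cases hmn : m ≤ 1 ∨ n ≤ 1
  · have h := degenerate_eq m n hmn board
    rw [h.1, h.2]
  · push_neg at hmn
    have hd : (board.length : Int) = m ∧ ∀ s ∈ board, PySem.Str.len s = n := by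
      rcases hpre with h | h | h
      · omega
      · omega
      · exact h
    have hm : m = (board.length : Int) := hd.1.symm
    have hrect : RectM (board.map String.toList) board.length n.toNat := by
      constructor
      · simp
      · intro r hr
        simp only [List.mem_map] at hr
        obtain ⟨s, hs, hsr⟩ := hr
        have hlen := hd.2 s hs
        have hlen2 : PySem.Str.len s = (s.toList.length : Int) := by
          simp [PySem.Str.len]
        rw [← hsr]
        omega
    show loopA m n (m.toNat * n.toNat + 1) (board.map String.toList)
        (List.replicate m.toNat (List.replicate n.toNat false)) 0 =
      loopB m n (m.toNat * n.toNat + 1) (board.map String.toList) 0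
    rw [hm, show n = ((n.toNat : Nat) : Int) from by omega]
    simp only [Int.toNat_natCast]
    exact loop_eq (board.length * n.toNat + 1) (board.map String.toList) 0 hrect
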